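-- pv_equiv track=rewrite | github.com/jcolinpatrick/kryptos | scripts/transposition/other/e_s_55_grid_route_sweep.py | col_major_perm
-- ===== SOURCE A (Python) =====
-- def col_major_perm(rows, cols, length=97):
--     """Column-by-column reading (top-to-bottom, left-to-right)."""
--     perm = []
--     for c in range(cols):
--         for r in range(rows):
--             pos = r * cols + c
--             if pos < length:
--                 perm.append(pos)
--     return perm
-- ===== SOURCE B (Python) =====
-- def col_major_perm(rows, cols, length=97):
--     """Column-by-column reading (top-to-bottom, left-to-right)."""
--     perm = []
--     for c in range(cols):
--         cnt = min(rows, (length - c - 1) // cols + 1)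
--         perm.extend(range(c, c + cnt * cols, cols))
--     return perm
-- ===== Notes on version B (the rewrite author's own statement) =====
-- stated objective: faster
-- what changed: Instead of testing every (row, column) cell against the length cap, B computes per column the number of in-range rows by integer division and emits that column's positions directly as an arithmetic range with step cols.
import Mathlib
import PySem

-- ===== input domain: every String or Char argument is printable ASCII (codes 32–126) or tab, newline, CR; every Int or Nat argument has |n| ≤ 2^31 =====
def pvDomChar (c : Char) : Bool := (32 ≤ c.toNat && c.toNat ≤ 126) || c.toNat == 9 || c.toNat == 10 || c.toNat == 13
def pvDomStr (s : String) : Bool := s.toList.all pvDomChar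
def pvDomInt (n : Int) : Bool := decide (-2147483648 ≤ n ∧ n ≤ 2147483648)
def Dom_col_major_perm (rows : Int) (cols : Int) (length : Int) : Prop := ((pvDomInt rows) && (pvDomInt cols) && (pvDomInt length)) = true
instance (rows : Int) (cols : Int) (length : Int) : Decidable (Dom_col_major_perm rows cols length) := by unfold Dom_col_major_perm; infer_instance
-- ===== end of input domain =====

-- B replaces A's per-cell scan of the whole rows×cols grid by a per-column count of
-- in-range rows (integer division) emitted as an arithmetic range (objective: faster).

-- ===== PORT A =====
def col_major_perm (rows : Int) (cols : Int) (length : Int) : List Int :=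
  (PySem.List.pyRange 0 cols 1).foldl (fun perm c =>
    (PySem.List.pyRange 0 rows 1).foldl (fun perm r =>
      let pos := r * cols + c
      if pos < length then perm ++ [pos] else perm) perm) []

-- ===== PORT B =====
def col_major_perm_alt (rows : Int) (cols : Int) (length : Int) : List Int :=
  (PySem.List.pyRange 0 cols 1).foldl (fun perm c =>
    let cnt := min rows (PySem.Int.floordiv (length - c - 1) cols + 1)
    perm ++ PySem.List.pyRange c (c + cnt * cols) cols) []

-- ===== PRECONDITION & SPEC =====
def Spec_col_major_perm (rows : Int) (cols : Int) (length : Int) (out : List Int) : Prop := out = col_major_perm_alt rows cols length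
instance (rows : Int) (cols : Int) (length : Int) (out : List Int) : Decidable (Spec_col_major_perm rows cols length out) := by unfold Spec_col_major_perm; infer_instance

-- ===== CLAIM (what is proved, stated in full; the proofs are below) =====
def Claim_equal_col_major_perm : Prop := ∀ (rows : Int) (cols : Int) (length : Int), Dom_col_major_perm rows cols length → Spec_col_major_perm rows cols length (col_major_perm rows cols length)

-- ===== LEMMAS AND PROOFS =====

-- filtering a range by an upper bound keeps exactly the shorter range
lemma filter_pyRange_lt (rows cnt : Int) (h : cnt ≤ rows) :
    (PySem.List.pyRange 0 rows 1).filter (fun r => decide (r < cnt)) = PySem.List.pyRange 0 cnt 1 := by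
  by_cases h0 : 0 ≤ cnt
  · rw [PySem.List.pyRange_one_append 0 cnt rows h0 h, List.filter_append,
      List.filter_eq_self.2 (by
        intro x hx
        rw [PySem.List.mem_pyRange_one] at hx
        simpa using hx.2),
      List.filter_eq_nil_iff.2 (by
        intro x hx
        rw [PySem.List.mem_pyRange_one] at hx
        simpa using hx.1),
      List.append_nil]
  · rw [List.filter_eq_nil_iff.2 (by
        intro x hx
        rw [PySem.List.mem_pyRange_one] at hx
        simp only [decide_eq_true_eq]
        omega),
      PySem.List.pyRange_one_eq_nil (by omega)]

-- the image of range(cnt) under r ↦ r*cols + c is range(c, c + cnt*cols, cols)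
lemma map_affine_pyRange (c cols cnt : Int) (hc : 0 < cols) :
    (PySem.List.pyRange 0 cnt 1).map (fun r => r * cols + c) =
      PySem.List.pyRange c (c + cnt * cols) cols := by
  rw [PySem.List.pyRange_one, PySem.List.pyRange_of_pos _ _ hc]
  by_cases h0 : 0 < cnt
  · have hif : c < c + cnt * cols := by nlinarith
    rw [if_pos hif]
    have hn : ((c + cnt * cols - c + cols - 1) / cols).toNat = cnt.toNat := by
      have he : c + cnt * cols - c + cols - 1 = (cols - 1) + cnt * cols := by ring
      rw [he, Int.add_mul_ediv_right _ _ (by omega : cols ≠ 0),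
        Int.ediv_eq_zero_of_lt (by omega) (by omega)]
      omega
    rw [hn, show (cnt - 0 : Int).toNat = cnt.toNat by omega, List.map_map]
    apply List.map_congr_left
    intro k _
    simp
    ring
  · rw [if_neg (by nlinarith), show (cnt - 0).toNat = 0 by omega]
    simp
-- one column: A's filtered cell scan equals B's arithmetic range
lemma column_eq (rows cols length c : Int) (hc0 : 0 ≤ c) (hcc : c < cols) :
    ((PySem.List.pyRange 0 rows 1).filter (fun r => decide (r * cols + c < length))).map
        (fun r => r * cols + c) =
      PySem.List.pyRange c
        (c + min rows (PySem.Int.floordiv (length - c - 1) cols + 1) * cols) cols := by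
  have hcols : 0 < cols := lt_of_le_of_lt hc0 hcc
  set fd := PySem.Int.floordiv (length - c - 1) cols with hfd
  have hbr : ∀ x : Int, x ≤ fd ↔ x * cols ≤ length - c - 1 := by
    intro x
    rw [hfd, PySem.Int.le_floordiv_iff_mul_le hcols]
  have hfilter : (PySem.List.pyRange 0 rows 1).filter (fun r => decide (r * cols + c < length))
      = (PySem.List.pyRange 0 rows 1).filter (fun r => decide (r < min rows (fd + 1))) := by
    apply List.filter_congr
    intro x hx
    rw [PySem.List.mem_pyRange_one] at hx
    simp only [decide_eq_decide]
    constructor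
    · intro h
      have : x ≤ fd := (hbr x).2 (by omega)
      omega
    · intro h
      have : x * cols ≤ length - c - 1 := (hbr x).1 (by omega)
      omega
  rw [hfilter, filter_pyRange_lt _ _ (min_le_left _ _), map_affine_pyRange _ _ _ hcols]

-- ===== VERDICT (by name: the statement is the Claim_ definition above) =====
theorem col_major_perm_spec : Claim_equal_col_major_perm := by
  intro rows cols length _
  unfold Spec_col_major_perm col_major_perm col_major_perm_alt
  apply PySem.List.foldl_congr_mem
  intro acc c hc
  rw [PySem.List.mem_pyRange_one] at hc
  show (PySem.List.pyRange 0 rows 1).foldl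
      (fun perm r => if r * cols + c < length then perm ++ [r * cols + c] else perm) acc = _
  rw [PySem.List.foldl_append_ite (fun r => r * cols + c < length) (fun r => r * cols + c)]
  exact congrArg _ (column_eq rows cols length c hc.1 hc.2)
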